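-- pv_equiv track=rewrite | github.com/Jude0124/Coding_test_practice | 프로그래머스/lv3/스타 수열.py | solution
-- ===== SOURCE A (Python) =====
-- from collections import defaultdict
--
-- def solution(a):
--     dic = defaultdict(list)
--     for i in range(len(a)):
--         dic[a[i]].append(i)
--     k = 0
--     for i in list(dic.values()):
--         cnt,c = 0,-1
--         for j in i:
--             if j != 0: #
--                 if c == j-1:
--                     cnt +=1
--                     c = j+1
--                 elif c == j:
--                     c = j+1
--                 else:
--                     cnt += 1
--                     c = j
--             else:
--                 c = j+1
--                 cnt += 1
--         if c == len(a):
--             cnt -= 1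
--         k = max(k,cnt)
--     return k*2
-- ===== SOURCE B (Python) =====
-- def solution(a):
--     best = 0
--     for v in set(a):
--         cnt = 0
--         i = 0
--         while i < len(a) - 1:
--             if (a[i] == v) != (a[i + 1] == v):
--                 cnt += 1
--                 i += 2
--             else:
--                 i += 1
--         best = max(best, cnt)
--     return best * 2
-- ===== Notes on version B (the rewrite author's own statement) =====
-- stated objective: idiomatic
-- what changed: Replaces A's value-to-index-list dictionary and cursor state machine with a direct greedy left-to-right pair scan of the array per distinct value using an XOR test (count a pair and skip 2 when exactly one of a[i], a[i+1] equals v).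
import Mathlib
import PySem

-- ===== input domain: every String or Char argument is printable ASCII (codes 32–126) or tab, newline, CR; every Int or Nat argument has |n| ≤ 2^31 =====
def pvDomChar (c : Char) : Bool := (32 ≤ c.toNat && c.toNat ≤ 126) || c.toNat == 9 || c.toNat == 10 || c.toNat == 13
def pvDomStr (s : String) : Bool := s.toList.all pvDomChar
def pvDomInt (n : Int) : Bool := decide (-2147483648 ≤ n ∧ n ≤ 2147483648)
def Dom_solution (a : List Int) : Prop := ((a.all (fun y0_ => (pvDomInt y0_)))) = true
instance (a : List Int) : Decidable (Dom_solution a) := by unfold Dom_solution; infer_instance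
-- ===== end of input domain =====

-- B replaces A's value→index-list dictionary and cursor state machine by a per-value greedy
-- XOR pair scan of the array (idiomatic, not faster: O(d·n) vs A's O(n)).

-- ===== PORT A =====
-- the body of A's inner loop over one value's index list; state p = (cnt, c)
def starStep (p : Int × Int) (j : Int) : Int × Int :=
  if j ≠ 0 then
    if p.2 = j - 1 then (p.1 + 1, j + 1)
    else if p.2 = j then (p.1, j + 1)
    else (p.1 + 1, j)
  else (p.1 + 1, j + 1)

def solution (a : List Int) : Int :=
  let dic : PySem.Dict Int (List Int) :=
    (PySem.List.pyRange 0 (PySem.List.len a)).foldl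
      (fun d i => d.modify (PySem.List.pyGetD a i 0) [] (fun l => l ++ [i])) PySem.Dict.empty
  let k : Int :=
    dic.values.foldl (fun k idxl =>
      let p := idxl.foldl starStep (0, -1)
      let cnt := if p.2 = PySem.List.len a then p.1 - 1 else p.1
      max k cnt) 0
  k * 2

-- ===== PORT B =====
-- Source B's while-loop scan (i += 2 when exactly one of a[i], a[i+1] equals v, else i += 1),
-- transcribed as structural recursion on the suffix a[i:]; exact
def pairScan (v : Int) : List Int → Int
  | x :: y :: t => if (decide (x = v)) != (decide (y = v)) then 1 + pairScan v t else pairScan v (y :: t)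
  | _ => 0

def solution_alt (a : List Int) : Int :=
  (PySem.Set.ofList a).foldl (fun best v => max best (pairScan v a)) 0 * 2

-- ===== PRECONDITION & SPEC =====
def Spec_solution (a : List Int) (out : Int) : Prop := out = solution_alt a
instance (a : List Int) (out : Int) : Decidable (Spec_solution a out) := by unfold Spec_solution; infer_instance

-- ===== CLAIM (what is proved, stated in full; the proofs are below) =====
def Claim_equal_solution : Prop := ∀ (a : List Int), Dom_solution a → Spec_solution a (solution a)

-- ===== LEMMAS AND PROOFS =====

-- abstract 3-state automaton describing A's inner loop relative to the scan position:
-- P : c = pos - 1, C : c = pos, F : c < pos - 1 (the final "c = len(a)" adjustment is the -1 at [])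
inductive StateS | P | C | F
deriving DecidableEq, Repr

def sA : StateS → Int → List Int → Int
  | s, _, [] => if s = .C then -1 else 0
  | s, v, x :: t =>
    if x = v then
      match s with
      | .P => 1 + sA .C v t
      | .C => sA .C v t
      | .F => 1 + sA .P v t
    else
      match s with
      | .P => sA .F v t
      | .C => sA .P v t
      | .F => sA .F v t

def stateOf (pos c : Int) : StateS :=
  if c = pos then .C else if c = pos - 1 then .P else .F

-- the indices ≥ pos (in increasing order) at which the suffix l carries value v
def idxAux (v : Int) (pos : Int) : List Int → List Int
  | [] => []
  | x :: t => (if x = v then [pos] else []) ++ idxAux v (pos + 1) t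

def enumInt (pos : Int) : List Int → List (Int × Int)
  | [] => []
  | x :: t => (x, pos) :: enumInt (pos + 1) t

theorem enum_spec (suf : List Int) : ∀ (pre : List Int),
    (PySem.List.pyRange (pre.length : Int) ((pre.length : Int) + (suf.length : Int))).map
      (fun i => (PySem.List.pyGetD (pre ++ suf) i 0, i)) = enumInt (pre.length : Int) suf := by
  induction suf with
  | nil =>
    intro pre
    simp [enumInt, PySem.List.pyRange]
  | cons x t ih =>
    intro pre
    have h1 : (pre.length : Int) < (pre.length : Int) + ((x :: t).length : Int) := by
      simp
    rw [PySem.List.pyRange_one_cons h1]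
    simp only [List.map_cons]
    have hget : PySem.List.pyGetD (pre ++ x :: t) (pre.length : Int) 0 = x := by
      rw [PySem.List.pyGetD_of_nonneg _ _ (by positivity)]
      simp [List.getD]
    have ih' := ih (pre ++ [x])
    simp only [List.length_append, List.length_cons, List.length_nil] at ih' ⊢
    push_cast at ih' ⊢
    rw [List.append_assoc] at ih'
    simp only [List.singleton_append] at ih'
    rw [show (pre.length : Int) + ((t.length : Int) + 1) = ((pre.length : Int) + 1) + (t.length : Int) by ring]
    rw [ih']
    simp [enumInt, hget]

theorem filter_enum (v : Int) (l : List Int) : ∀ (pos : Int),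
    ((enumInt pos l).filter (fun p => p.1 == v)).map (fun p => p.2) = idxAux v pos l := by
  induction l with
  | nil => intro pos; simp [enumInt, idxAux]
  | cons x t ih =>
    intro pos
    by_cases h : x = v <;> simp [enumInt, idxAux, h, ih]

theorem stateOf_ne_C {pos c : Int} (h : c ≠ pos) : stateOf pos c ≠ StateS.C := by
  unfold stateOf; split_ifs <;> simp_all

theorem sA_nil_ne (s : StateS) (v : Int) (h : s ≠ StateS.C) : sA s v [] = 0 := by
  cases s <;> simp_all [sA]

theorem foldIdx (v : Int) (l : List Int) : ∀ (pos cnt c : Int),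
    c ≤ pos → 0 ≤ pos → (pos = 0 → c = -1) →
    (if ((idxAux v pos l).foldl starStep (cnt, c)).2 = pos + (l.length : Int)
      then ((idxAux v pos l).foldl starStep (cnt, c)).1 - 1
      else ((idxAux v pos l).foldl starStep (cnt, c)).1)
      = cnt + sA (stateOf pos c) v l := by
  induction l with
  | nil =>
    intro pos cnt c hle h0 hz
    simp only [idxAux, List.foldl_nil, List.length_nil, Nat.cast_zero, add_zero]
    by_cases h : c = pos
    · rw [if_pos h, show stateOf pos c = StateS.C by simp [stateOf, h]]
      rw [show sA StateS.C v [] = -1 from rfl]; ring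
    · rw [if_neg h, sA_nil_ne _ _ (stateOf_ne_C h)]; ring
  | cons x t ih =>
    intro pos cnt c hle h0 hz
    by_cases hx : x = v
    · rw [show idxAux v pos (x :: t) = pos :: idxAux v (pos + 1) t by simp [idxAux, hx]]
      simp only [List.foldl_cons, List.length_cons]
      push_cast
      rw [show pos + ((t.length : Int) + 1) = (pos + 1) + (t.length : Int) by ring]
      by_cases hC : c = pos
      · -- state C : pos ≠ 0 (else c = -1 = 0, impossible)
        have hpos : ¬ pos = 0 := by intro h; have := hz h; omega
        rw [show starStep (cnt, c) pos = (cnt, pos + 1) by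
          unfold starStep; rw [if_pos hpos, if_neg (by omega), if_pos (by omega)]]
        rw [ih (pos + 1) cnt (pos + 1) (le_refl _) (by omega) (by omega)]
        rw [show stateOf (pos + 1) (pos + 1) = StateS.C by simp [stateOf]]
        rw [show stateOf pos c = StateS.C by simp [stateOf, hC]]
        simp [sA, hx]
      · by_cases hP : c = pos - 1
        · -- state P : counts, partner is pos + 1
          rw [show starStep (cnt, c) pos = (cnt + 1, pos + 1) by
            unfold starStep
            by_cases hpz : pos = 0
            · rw [if_neg (by simp [hpz]), hpz]
            · rw [if_pos hpz, if_pos (by omega)]]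
          rw [ih (pos + 1) (cnt + 1) (pos + 1) (le_refl _) (by omega) (by omega)]
          rw [show stateOf (pos + 1) (pos + 1) = StateS.C by simp [stateOf]]
          rw [show stateOf pos c = StateS.P by unfold stateOf; rw [if_neg hC, if_pos hP]]
          simp [sA, hx]; ring
        · -- state F : counts, c := pos, so pos ≠ 0 by hz
          have hpos : ¬ pos = 0 := by intro h; have := hz h; omega
          rw [show starStep (cnt, c) pos = (cnt + 1, pos) by
            unfold starStep; rw [if_pos hpos, if_neg (by omega), if_neg (by omega)]]
          rw [ih (pos + 1) (cnt + 1) pos (by omega) (by omega) (by omega)]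
          rw [show stateOf (pos + 1) pos = StateS.P by
            unfold stateOf; rw [if_neg (by omega), if_pos (by omega)]]
          rw [show stateOf pos c = StateS.F by
            unfold stateOf; rw [if_neg hC, if_neg hP]]
          simp [sA, hx]; ring
    · -- a[pos] ≠ v : no index here, the state shifts down one position
      rw [show idxAux v pos (x :: t) = idxAux v (pos + 1) t by simp [idxAux, hx]]
      simp only [List.length_cons]
      push_cast
      rw [show pos + ((t.length : Int) + 1) = (pos + 1) + (t.length : Int) by ring]
      rw [ih (pos + 1) cnt c (by omega) (by omega) (by omega)]
      have hs : sA (stateOf pos c) v (x :: t) = sA (stateOf (pos + 1) c) v t := by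
        by_cases hC : c = pos
        · rw [show stateOf pos c = StateS.C by simp [stateOf, hC],
              show stateOf (pos + 1) c = StateS.P by
                unfold stateOf; rw [if_neg (by omega), if_pos (by omega)]]
          simp [sA, hx]
        · by_cases hP : c = pos - 1
          · rw [show stateOf pos c = StateS.P by unfold stateOf; rw [if_neg hC, if_pos hP],
                show stateOf (pos + 1) c = StateS.F by
                  unfold stateOf; rw [if_neg (by omega), if_neg (by omega)]]
            simp [sA, hx]
          · rw [show stateOf pos c = StateS.F by unfold stateOf; rw [if_neg hC, if_neg hP],
                show stateOf (pos + 1) c = StateS.F by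
                  unfold stateOf; rw [if_neg (by omega), if_neg (by omega)]]
            simp [sA, hx]
      rw [hs]

theorem sAP_eq (v : Int) : (l : List Int) → sA .P v l = pairScan v l
  | [] => by simp [sA, pairScan]
  | [x] => by by_cases h : x = v <;> simp [sA, pairScan, h]
  | x :: y :: t => by
    have ih1 := sAP_eq v t
    have ih2 := sAP_eq v (y :: t)
    by_cases hx : x = v <;> by_cases hy : y = v
    · rw [show sA .P v (x :: y :: t) = 1 + sA .C v t by simp [sA, hx, hy]]
      rw [show pairScan v (x :: y :: t) = pairScan v (y :: t) by simp [pairScan, hx, hy]]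
      rw [← ih2]
      simp [sA, hy]
    · rw [show sA .P v (x :: y :: t) = 1 + sA .P v t by simp [sA, hx, hy]]
      rw [show pairScan v (x :: y :: t) = 1 + pairScan v t by simp [pairScan, hx, hy]]
      rw [ih1]
    · rw [show sA .P v (x :: y :: t) = 1 + sA .P v t by simp [sA, hx, hy]]
      rw [show pairScan v (x :: y :: t) = 1 + pairScan v t by simp [pairScan, hx, hy]]
      rw [ih1]
    · rw [show sA .P v (x :: y :: t) = sA .F v t by simp [sA, hx, hy]]
      rw [show pairScan v (x :: y :: t) = pairScan v (y :: t) by simp [pairScan, hx, hy]]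
      rw [← ih2]
      simp [sA, hy]

-- A's inner loop on the index list of v, with the final adjustment, is B's pair scan
theorem cnt_eq (a : List Int) (v : Int) :
    (if ((idxAux v 0 a).foldl starStep (0, -1)).2 = PySem.List.len a
      then ((idxAux v 0 a).foldl starStep (0, -1)).1 - 1
      else ((idxAux v 0 a).foldl starStep (0, -1)).1) = pairScan v a := by
  have h := foldIdx v a 0 0 (-1) (by omega) (le_refl _) (fun _ => rfl)
  rw [show (0 : Int) + (a.length : Int) = (a.length : Int) by ring] at h
  rw [show PySem.List.len a = (a.length : Int) from rfl, h]
  rw [show stateOf 0 (-1) = .P by decide]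
  rw [sAP_eq]
  ring

-- assembling A: the dictionary's keys are set(a), its value at v is v's index list,
-- and the per-value count is B's pair scan
theorem solA_eq (a : List Int) :
    solution a = ((PySem.Set.ofList a).foldl (fun k v => max k (pairScan v a)) 0) * 2 := by
  unfold solution
  simp only []
  have henum : (PySem.List.pyRange 0 (PySem.List.len a)).map
      (fun i => (PySem.List.pyGetD a i 0, i)) = enumInt 0 a := by
    have h := enum_spec a []
    simpa using h
  have hkeys : ((PySem.List.pyRange 0 (PySem.List.len a)).foldl
      (fun d i => d.modify (PySem.List.pyGetD a i 0) [] (fun l => l ++ [i]))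
      (PySem.Dict.empty : PySem.Dict Int (List Int))).keys = PySem.Set.ofList a := by
    have h := PySem.Dict.keys_foldl_modify_key (PySem.List.pyRange 0 (PySem.List.len a))
      (fun i => PySem.List.pyGetD a i 0) ([] : List Int) (fun _ i l => l ++ [i])
      PySem.Dict.empty
    have hm := PySem.List.map_pyGetD_pyRange_zero a 0
    simp [PySem.List.len] at hm h ⊢
    rw [hm] at h
    exact h
  have hnodup : ((PySem.List.pyRange 0 (PySem.List.len a)).foldl
      (fun d i => d.modify (PySem.List.pyGetD a i 0) [] (fun l => l ++ [i]))
      (PySem.Dict.empty : PySem.Dict Int (List Int))).keys.Nodup := by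
    exact PySem.Dict.nodup_keys_foldl_modify_key _
      (fun i => PySem.List.pyGetD a i 0) ([] : List Int) (fun _ i l => l ++ [i]) _
      (by simp [PySem.Dict.keys_empty])
  have hgetD : ∀ v : Int, ((PySem.List.pyRange 0 (PySem.List.len a)).foldl
      (fun d i => d.modify (PySem.List.pyGetD a i 0) [] (fun l => l ++ [i]))
      (PySem.Dict.empty : PySem.Dict Int (List Int))).getD v [] = idxAux v 0 a := by
    intro v
    have h3 : ((PySem.List.pyRange 0 (PySem.List.len a)).foldl
        (fun d i => d.modify (PySem.List.pyGetD a i 0) [] (fun l => l ++ [i]))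
        (PySem.Dict.empty : PySem.Dict Int (List Int))) =
        (enumInt 0 a).foldl (fun d p => d.modify p.1 [] (fun l => l ++ [p.2]))
          PySem.Dict.empty := by
      rw [← henum, List.foldl_map]
    rw [h3, PySem.Dict.getD_foldl_modify_append, PySem.Dict.getD_empty, List.nil_append,
      filter_enum]
  have hvals : ((PySem.List.pyRange 0 (PySem.List.len a)).foldl
      (fun d i => d.modify (PySem.List.pyGetD a i 0) [] (fun l => l ++ [i]))
      (PySem.Dict.empty : PySem.Dict Int (List Int))).values =
      (PySem.Set.ofList a).map (fun v => idxAux v 0 a) := by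
    rw [PySem.Dict.values_eq_map_keys _ hnodup [], hkeys]
    exact List.map_congr_left (fun v _ => hgetD v)
  rw [hvals, List.foldl_map]
  congr 1
  apply PySem.List.foldl_congr_mem
  intro acc v _
  rw [cnt_eq]

-- ===== VERDICT (by name: the statement is the Claim_ definition above) =====
theorem solution_spec : Claim_equal_solution := by
  intro a _
  show solution a = solution_alt a
  rw [solA_eq]
  rfl
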